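-- pv_equiv track=rewrite | github.com/mbyien/Percepteye | src/data/validator.py | validate_comments
-- ===== SOURCE A (Python) =====
-- from typing import List, Dict
--
-- def validate_comments(comments: List[Dict], text_field: str = 'text') -> tuple[bool, str]:
--     """
--     Validate that comments have the required structure.
--
--     Args:
--         comments: List of comment dictionaries
--         text_field: Field name containing the comment text
--
--     Returns:
--         Tuple of (is_valid, error_message)
--     """
--     if not comments:
--         return False, "No comments provided"
--
--     if not isinstance(comments, list):
--         return False, "Comments must be a list"
--
--     missing_field_count = 0
--     for i, comment in enumerate(comments):
--         if not isinstance(comment, dict):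
--             return False, f"Comment {i} is not a dictionary"
--
--         if text_field not in comment:
--             missing_field_count += 1
--
--     if missing_field_count == len(comments):
--         return False, f"No comments have the '{text_field}' field"
--
--     return True, ""
-- ===== SOURCE B (Python) =====
-- from typing import List, Dict
--
-- def validate_comments(comments: List[Dict], text_field: str = 'text') -> tuple[bool, str]:
--     if not comments:
--         return False, "No comments provided"
--     all_keys = set()
--     for comment in comments:
--         all_keys.update(comment.keys())
--     if text_field in all_keys:
--         return True, ""
--     return False, f"No comments have the '{text_field}' field"
-- ===== Notes on version B (the rewrite author's own statement) =====
-- stated objective: alternative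
-- what changed: Instead of testing each comment for the field and counting the misses against len(comments), B builds a set index of the union of all keys occurring in any comment and decides validity by a single membership lookup of text_field in that set.
import Mathlib
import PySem

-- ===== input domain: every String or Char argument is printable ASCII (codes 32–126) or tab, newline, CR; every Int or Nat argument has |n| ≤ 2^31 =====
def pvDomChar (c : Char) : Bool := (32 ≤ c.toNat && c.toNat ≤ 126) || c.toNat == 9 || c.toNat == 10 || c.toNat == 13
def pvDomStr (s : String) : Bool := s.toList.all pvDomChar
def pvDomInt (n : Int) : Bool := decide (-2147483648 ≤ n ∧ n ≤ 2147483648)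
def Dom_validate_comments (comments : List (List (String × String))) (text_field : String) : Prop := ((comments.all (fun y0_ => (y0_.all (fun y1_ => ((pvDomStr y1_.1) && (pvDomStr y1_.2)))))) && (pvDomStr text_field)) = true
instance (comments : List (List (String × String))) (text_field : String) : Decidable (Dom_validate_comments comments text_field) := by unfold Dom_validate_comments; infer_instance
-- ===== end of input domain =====

-- B replaces A's per-comment field test with a counting accumulator by a set index: it unions all keys of all comments into one set, then answers with a single membership lookup; same cost, different data structure.


-- ===== PORT A =====
-- 'text_field in comment' (dict key membership) is key membership in the association list.
def pvHasField (comment : List (String × String)) (text_field : String) : Bool :=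
  comment.any (fun kv => kv.1 == text_field)

-- The `isinstance` checks of A are vacuous under the type convention (comments is a typed list of dicts).
def validate_comments (comments : List (List (String × String))) (text_field : String) : Bool × String :=
  if comments.isEmpty then (false, "No comments provided")
  else
    let missing_field_count : Nat :=
      comments.foldl (fun acc comment => if !(pvHasField comment text_field) then acc + 1 else acc) 0
    if missing_field_count == comments.length then
      (false, "No comments have the '" ++ text_field ++ "' field")
    else (true, "")

-- ===== PORT B =====
-- Source B: all_keys = set(); for comment in comments: all_keys.update(comment.keys()); then one lookup.
def validate_comments_alt (comments : List (List (String × String))) (text_field : String) : Bool × String :=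
  if comments.isEmpty then (false, "No comments provided")
  else
    let all_keys : PySem.Set String :=
      comments.foldl (fun s comment => PySem.Set.update s (comment.map Prod.fst)) PySem.Set.empty
    if PySem.Set.contains all_keys text_field then (true, "")
    else (false, "No comments have the '" ++ text_field ++ "' field")

-- ===== PRECONDITION & SPEC =====
def Spec_validate_comments (comments : List (List (String × String))) (text_field : String) (out : Bool × String) : Prop := out = validate_comments_alt comments text_field
instance (comments : List (List (String × String))) (text_field : String) (out : Bool × String) : Decidable (Spec_validate_comments comments text_field out) := by unfold Spec_validate_comments; infer_instance

-- ===== CLAIM (what is proved, stated in full; the proofs are below) =====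
def Claim_equal_validate_comments : Prop := ∀ (comments : List (List (String × String))) (text_field : String), Dom_validate_comments comments text_field → Spec_validate_comments comments text_field (validate_comments comments text_field)

-- ===== LEMMAS AND PROOFS =====

-- Membership in B's accumulated key set: tf is in the folded set iff it was already in s or some comment carries it.
theorem mem_foldl_update (l : List (List (String × String))) (tf : String) (s : PySem.Set String) :
    (tf ∈ l.foldl (fun s comment => PySem.Set.update s (comment.map Prod.fst)) s)
      ↔ tf ∈ s ∨ ∃ c ∈ l, pvHasField c tf := by
  induction l generalizing s with
  | nil => simp
  | cons x xs ih =>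
    simp only [List.foldl_cons, ih, PySem.Set.mem_update, List.mem_map, List.mem_cons, pvHasField,
      List.any_eq_true, beq_iff_eq]
    constructor
    · rintro (⟨h | ⟨kv, hkv, hk⟩⟩ | ⟨c, hc, kv, hkv, hk⟩)
      · exact Or.inl h
      · exact Or.inr ⟨x, Or.inl rfl, kv, hkv, hk ▸ rfl⟩
      · exact Or.inr ⟨c, Or.inr hc, kv, hkv, hk⟩
    · rintro (h | ⟨c, hc | hc, kv, hkv, hk⟩)
      · exact Or.inl (Or.inl h)
      · exact Or.inl (Or.inr ⟨kv, hc ▸ hkv, hk⟩)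
      · exact Or.inr ⟨c, hc, kv, hkv, hk⟩

-- A's counting loop counts exactly the comments missing the field.
theorem foldl_missing_eq_countP (l : List (List (String × String))) (tf : String) (a : Nat) :
    l.foldl (fun acc comment => if !(pvHasField comment tf) then acc + 1 else acc) a
      = a + l.countP (fun comment => !(pvHasField comment tf)) := by
  induction l generalizing a with
  | nil => simp
  | cons x xs ih =>
    simp only [List.foldl_cons, List.countP_cons, ih]
    by_cases h : pvHasField x tf <;> simp [h] <;> omega

-- missing count = length  ↔  no comment has the field
theorem countP_missing_eq_length_iff (l : List (List (String × String))) (tf : String) :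
    (l.countP (fun comment => !(pvHasField comment tf)) = l.length)
      ↔ ¬ ∃ c ∈ l, pvHasField c tf := by
  rw [List.countP_eq_length]
  simp

-- ===== VERDICT (by name: the statement is the Claim_ definition above) =====
theorem validate_comments_spec : Claim_equal_validate_comments := by
  intro comments text_field _
  unfold Spec_validate_comments validate_comments validate_comments_alt
  by_cases he : comments.isEmpty
  · simp [he]
  · rw [foldl_missing_eq_countP]
    by_cases hx : ∃ c ∈ comments, pvHasField c text_field
    · have hc : comments.countP (fun comment => !(pvHasField comment text_field)) ≠ comments.length :=
        fun h => ((countP_missing_eq_length_iff comments text_field).mp h) hx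
      have hin : text_field ∈ comments.foldl
          (fun s comment => PySem.Set.update s (comment.map Prod.fst)) ([] : PySem.Set String) :=
        (mem_foldl_update comments text_field []).mpr (Or.inr hx)
      simp [he, hc, hin, PySem.Set.empty]
    · have hc : comments.countP (fun comment => !(pvHasField comment text_field)) = comments.length :=
        (countP_missing_eq_length_iff comments text_field).mpr hx
      have hnin : text_field ∉ comments.foldl
          (fun s comment => PySem.Set.update s (comment.map Prod.fst)) ([] : PySem.Set String) := by
        intro h
        rcases (mem_foldl_update comments text_field []).mp h with h' | h'
        · simp at h'
        · exact hx h'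
      simp [he, hc, hnin, PySem.Set.empty]
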